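-- pv_equiv track=rewrite | github.com/cytham/nanovar | nanovar/nv_dup_te_detect.py | update_dups
-- ===== SOURCE A (Python) =====
-- def update_dups(dups, index2dup, index2reads):
--     for i in index2reads:
--         for r in index2reads[i].split(','):
--             if r in dups:
--                 try:
--                     index2dup[i] += 1
--                 except KeyError:
--                     pass
--     return index2dup
-- ===== SOURCE B (Python) =====
-- def update_dups(dups, index2dup, index2reads):
--     # Inverted traversal: instead of scanning index2reads and incrementing the
--     # target dict per matching read, rebuild index2dup from its own entries,
--     # looking each index up in index2reads; dups becomes a set for O(1) membership.
--     # Equal return value; does not mutate index2dup in place (A does).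
--     dupset = set(dups)
--     return {i: v + sum(r in dupset for r in index2reads[i].split(','))
--                if i in index2reads else v
--             for i, v in index2dup.items()}
-- ===== Notes on version B (the rewrite author's own statement) =====
-- stated objective: alternative
-- what changed: Inverts the traversal: instead of scanning index2reads and incrementing the target dict entry per matching read under try/except, B rebuilds index2dup from its own entries with one lookup into index2reads per index and a set of dups for membership; equal return value, but B does not mutate index2dup in place.
import Mathlib
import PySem

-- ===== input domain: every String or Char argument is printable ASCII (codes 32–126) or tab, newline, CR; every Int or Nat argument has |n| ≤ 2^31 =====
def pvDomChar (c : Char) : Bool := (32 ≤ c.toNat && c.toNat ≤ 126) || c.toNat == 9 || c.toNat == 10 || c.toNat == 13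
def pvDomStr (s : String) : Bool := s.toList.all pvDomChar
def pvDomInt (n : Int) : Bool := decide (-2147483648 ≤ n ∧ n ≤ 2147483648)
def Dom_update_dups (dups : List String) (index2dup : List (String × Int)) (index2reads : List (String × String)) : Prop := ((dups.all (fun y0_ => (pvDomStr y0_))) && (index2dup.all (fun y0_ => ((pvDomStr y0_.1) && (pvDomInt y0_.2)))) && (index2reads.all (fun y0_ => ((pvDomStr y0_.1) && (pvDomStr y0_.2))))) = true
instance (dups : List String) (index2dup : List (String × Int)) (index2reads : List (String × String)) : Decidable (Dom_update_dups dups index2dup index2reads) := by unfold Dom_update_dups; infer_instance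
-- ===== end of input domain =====

-- B inverts the traversal: it rebuilds index2dup from its own entries with one lookup
-- into index2reads per index (and a set of dups), instead of scanning index2reads and
-- incrementing per matching read under try/except (objective: alternative). A mutates
-- index2dup in place in Python, B builds a new dict: the equivalence proved here is
-- about the RETURN value only.


-- ===== PORT A =====
-- s.split(',') — sep is the nonempty literal ",", so Str.split? is always `some`
def pvSplit (s : String) : List String := (PySem.Str.split? s ",").getD []

-- for i in index2reads: for r in index2reads[i].split(','):
--   if r in dups: try: index2dup[i] += 1 except KeyError: pass
def update_dups (dups : List String) (index2dup : List (String × Int)) (index2reads : List (String × String)) : List (String × Int) :=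
  let reads : PySem.Dict String String := PySem.Dict.mk index2reads
  (reads.keys.foldl (fun (d : PySem.Dict String Int) i =>
      (pvSplit (reads.getD i "")).foldl (fun d r =>
        if dups.contains r then
          match d.get? i with          -- try: d[i] += 1 except KeyError: pass
          | some v => d.insert i (v + 1)
          | none   => d
        else d) d)
    (PySem.Dict.mk index2dup)).items

-- ===== PORT B =====
-- dupset = set(dups)
-- return {i: v + sum(r in dupset for r in index2reads[i].split(','))
--            if i in index2reads else v
--         for i, v in index2dup.items()}
def update_dups_alt (dups : List String) (index2dup : List (String × Int)) (index2reads : List (String × String)) : List (String × Int) :=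
  let dupset : PySem.Set String := PySem.Set.ofList dups
  let R : PySem.Dict String String := PySem.Dict.mk index2reads
  ((PySem.Dict.mk index2dup).items.foldl (fun (d : PySem.Dict String Int) p =>
      d.insert p.1
        (if R.contains p.1 then
           p.2 + (pvSplit (R.getD p.1 "")).foldl
             (fun acc r => acc + (if PySem.Set.contains dupset r then 1 else 0)) 0
         else p.2))
    PySem.Dict.empty).items

-- ===== PRECONDITION & SPEC =====
-- Pre_ excludes association lists with duplicate keys, which do not represent any
-- Python dict (Python dict keys are unique), so neither program's behaviour there is
-- specified by the source.
def Pre_update_dups (dups : List String) (index2dup : List (String × Int)) (index2reads : List (String × String)) : Prop :=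
  (index2dup.map Prod.fst).Nodup ∧ (index2reads.map Prod.fst).Nodup
instance (dups : List String) (index2dup : List (String × Int)) (index2reads : List (String × String)) : Decidable (Pre_update_dups dups index2dup index2reads) := by unfold Pre_update_dups; infer_instance
def pvWitness_update_dups : List String × (List (String × Int)) × (List (String × String)) :=
  (["r1"], [("i1", 2), ("i2", 0)], [("i1", "r1,r2,r1"), ("i3", "r1")])

def Spec_update_dups (dups : List String) (index2dup : List (String × Int)) (index2reads : List (String × String)) (out : List (String × Int)) : Prop := out = update_dups_alt dups index2dup index2reads
instance (dups : List String) (index2dup : List (String × Int)) (index2reads : List (String × String)) (out : List (String × Int)) : Decidable (Spec_update_dups dups index2dup index2reads out) := by unfold Spec_update_dups; infer_instance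

-- ===== CLAIM (what is proved, stated in full; the proofs are below) =====
def Claim_equal_update_dups : Prop := ∀ (dups : List String) (index2dup : List (String × Int)) (index2reads : List (String × String)), Dom_update_dups dups index2dup index2reads → Pre_update_dups dups index2dup index2reads → Spec_update_dups dups index2dup index2reads (update_dups dups index2dup index2reads)

-- ===== LEMMAS AND PROOFS =====

-- the number of dup reads in a reads string, and its first-match lookup in an assoc list
def pvCnt (dups : List String) (s : String) : Int :=
  ((pvSplit s).countP (fun r => dups.contains r) : Int)

def pvLook (dups : List String) (rl : List (String × String)) (i : String) : Int :=
  match rl.find? (fun q => q.1 == i) with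
  | some q => pvCnt dups q.2
  | none   => 0

-- A's inner loop at one index i, as a function of the read list rs and the state d.
def pvInner (dups : List String) (i : String) (d : PySem.Dict String Int) (rs : List String) : PySem.Dict String Int :=
  rs.foldl (fun d r =>
    if dups.contains r then
      match d.get? i with
      | some v => d.insert i (v + 1)
      | none   => d
    else d) d

-- B's count, as countP.
lemma pv_count_eq (dups rs : List String) :
    rs.foldl (fun acc r => acc + (if dups.contains r then 1 else 0)) (0 : Int)
      = (rs.countP (fun r => dups.contains r) : Int) := by
  suffices h : ∀ acc : Int, rs.foldl (fun acc r => acc + (if dups.contains r then 1 else 0)) acc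
      = acc + (rs.countP (fun r => dups.contains r) : Int) by
    simpa using h 0
  induction rs with
  | nil => intro acc; simp
  | cons r rs ih =>
    intro acc
    simp only [List.foldl_cons, List.countP_cons, ih]
    by_cases hr : dups.contains r = true <;> simp [hr] <;> ring

-- set(dups) membership agrees with list membership
lemma pv_set_contains (dups : List String) (r : String) :
    PySem.Set.contains (PySem.Set.ofList dups) r = dups.contains r := by
  simp [PySem.Set.contains, PySem.Set.mem_ofList]

-- Dict.mk lookup is first match
lemma pv_get?_mk_find (l : List (String × String)) (k : String) :
    (PySem.Dict.mk l).get? k = (l.find? (fun q => q.1 == k)).map Prod.snd := by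
  induction l with
  | nil => simp [PySem.Dict.get?]
  | cons p t ih =>
    rw [show (p :: t) = ((p.1, p.2) :: t) by simp, PySem.Dict.get?_mk_cons]
    by_cases h : (p.1 == k) = true
    · simp [List.find?_cons, h]
    · simp [List.find?_cons, h, ih]

-- absent key: A's inner loop is the identity
lemma pvInner_absent (dups : List String) (i : String) (d : PySem.Dict String Int)
    (rs : List String) (h : d.get? i = none) : pvInner dups i d rs = d := by
  induction rs with
  | nil => rfl
  | cons r rs ih =>
    have hstep : (if dups.contains r = true then
        match d.get? i with
        | some v => d.insert i (v + 1)
        | none => d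
      else d) = d := by rw [h]; split <;> rfl
    simp only [pvInner, List.foldl_cons] at ih ⊢
    rw [hstep]; exact ih

-- re-inserting the present value changes nothing (keys unique)
lemma pv_insert_self (d : PySem.Dict String Int) (i : String) (v : Int)
    (hnd : d.keys.Nodup) (h : d.get? i = some v) : d.insert i v = d := by
  apply PySem.Dict.ext
  rw [PySem.Dict.items_insert_of_contains d v (by rw [PySem.Dict.contains_eq_isSome_get?, h]; rfl)]
  have : ∀ p ∈ d.items, (if (p.1 == i) = true then ((i, v) : String × Int) else p) = p := by
    intro p hp
    by_cases hpi : (p.1 == i) = true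
    · have hp1 : p.1 = i := by simpa using hpi
      have := PySem.Dict.get?_of_mem_items d (k := p.1) (v := p.2) (by simpa using hp) hnd
      rw [hp1, h] at this
      have hv : v = p.2 := by simpa using this
      rw [hv, ← hp1]; simp
    · simp [hpi]
  exact (List.map_congr_left this).trans (List.map_id _)

-- present key: A's inner loop adds the count in one step
lemma pvInner_present (dups : List String) (i : String) (d : PySem.Dict String Int)
    (rs : List String) (v : Int) (hnd : d.keys.Nodup) (h : d.get? i = some v) :
    pvInner dups i d rs = d.insert i (v + (rs.countP (fun r => dups.contains r) : Int)) := by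
  induction rs generalizing d v with
  | nil =>
    simp only [pvInner, List.foldl_nil, List.countP_nil, Nat.cast_zero, add_zero]
    exact (pv_insert_self d i v hnd h).symm
  | cons r rs ih =>
    simp only [pvInner, List.foldl_cons, h, List.countP_cons]
    by_cases hr : dups.contains r = true
    · have h1 := ih (d.insert i (v + 1)) (v + 1)
        (PySem.Dict.nodup_keys_insert d i (v + 1) hnd)
        (PySem.Dict.get?_insert_self d i (v + 1))
      simp only [pvInner] at h1
      rw [hr, if_pos rfl, h1, PySem.Dict.insert_insert_self]
      congr 1
      simp
      ring
    · have h1 := ih d v hnd h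
      simp only [pvInner] at h1
      rw [if_neg hr, h1]
      have hne : (r ∈ dups) = False := by simpa using hr
      simp [hne]

-- one A-step maps the items pointwise and keeps the keys
lemma pvInner_items (dups : List String) (i : String) (d : PySem.Dict String Int)
    (rs : List String) (hnd : d.keys.Nodup) :
    (pvInner dups i d rs).items
        = d.items.map (fun p => if p.1 == i then (p.1, p.2 + (rs.countP (fun r => dups.contains r) : Int)) else p)
    ∧ (pvInner dups i d rs).keys = d.keys := by
  cases hk : d.get? i with
  | none =>
    rw [pvInner_absent dups i d rs hk]
    have hmem : ∀ p ∈ d.items, (p.1 == i) = false := by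
      intro p hp
      have hni : i ∉ d.keys := (PySem.Dict.get?_eq_none_iff_not_mem_keys d i).mp hk
      by_contra hb
      have : p.1 = i := by simpa using (Bool.not_eq_false _).mp hb
      exact hni (this ▸ PySem.Dict.mem_keys_of_mem_items d hp)
    refine ⟨?_, rfl⟩
    symm
    refine (List.map_congr_left ?_).trans (List.map_id _)
    intro p hp; simp [hmem p hp]
  | some v =>
    have hcon : d.contains i = true := by
      rw [PySem.Dict.contains_eq_isSome_get?, hk]; rfl
    rw [pvInner_present dups i d rs v hnd hk]
    constructor
    · rw [PySem.Dict.items_insert_of_contains d _ hcon]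
      apply List.map_congr_left
      intro p hp
      by_cases hpi : (p.1 == i) = true
      · have hp1 : p.1 = i := by simpa using hpi
        have := PySem.Dict.get?_of_mem_items d (k := p.1) (v := p.2) hp hnd
        rw [hp1, hk] at this
        have hv : v = p.2 := by simpa using this
        simp [hpi, hp1, hv]
      · simp [hpi]
    · exact PySem.Dict.keys_insert_of_contains d _ hcon

-- the whole outer loop of A maps each entry to its looked-up count
lemma pv_fold_items (dups : List String) (R : PySem.Dict String String)
    (rl : List (String × String)) :
    ∀ d : PySem.Dict String Int, d.keys.Nodup → (rl.map Prod.fst).Nodup →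
    (∀ p ∈ rl, R.getD p.1 "" = p.2) →
    ((rl.map Prod.fst).foldl (fun d i => pvInner dups i d (pvSplit (R.getD i ""))) d).items
      = d.items.map (fun p => (p.1, p.2 + pvLook dups rl p.1)) := by
  induction rl with
  | nil =>
    intro d _ _ _
    simp [pvLook]
  | cons q t ih =>
    intro d hnd hrl hR
    have hq : R.getD q.1 "" = q.2 := hR q (List.mem_cons_self ..)
    have hstep := pvInner_items dups q.1 d (pvSplit (R.getD q.1 "")) hnd
    have hnd' : (pvInner dups q.1 d (pvSplit (R.getD q.1 ""))).keys.Nodup := by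
      rw [hstep.2]; exact hnd
    have hq1 : q.1 ∉ t.map Prod.fst := by
      have := hrl; simp only [List.map_cons, List.nodup_cons] at this; exact this.1
    simp only [List.map_cons, List.foldl_cons]
    rw [ih _ hnd' (by simpa using hrl.of_cons) (fun p hp => hR p (List.mem_cons_of_mem _ hp)),
        hstep.1, List.map_map]
    apply List.map_congr_left
    intro p _
    by_cases hpi : (p.1 == q.1) = true
    · have hp1 : p.1 = q.1 := by simpa using hpi
      have hqp : (q.1 == p.1) = true := by simp [hp1]
      have hnone : t.find? (fun r => r.1 == p.1) = none := by
        rw [List.find?_eq_none]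
        intro r hr
        simp only [Bool.not_eq_true, beq_eq_false_iff_ne]
        intro hc
        exact hq1 (hp1 ▸ hc ▸ List.mem_map_of_mem hr)
      have e1 : pvLook dups (q :: t) p.1 = pvCnt dups q.2 := by
        simp only [pvLook, List.find?_cons, hqp]
      have e2 : pvLook dups t p.1 = 0 := by rw [pvLook, hnone]
      simp only [Function.comp_apply, if_pos hpi, e1, e2]
      simp only [pvCnt, hq]
      simp
    · have hqp : (q.1 == p.1) = false := by
        rw [beq_eq_false_iff_ne]
        intro h
        exact hpi (by simp [h])
      have e1 : pvLook dups (q :: t) p.1 = pvLook dups t p.1 := by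
        simp only [pvLook, List.find?_cons, hqp]
      simp only [Function.comp_apply, if_neg hpi, e1]

-- B's per-entry value is the looked-up count
lemma pv_value_eq (dups : List String) (index2reads : List (String × String)) (p : String × Int) :
    (if (PySem.Dict.mk index2reads).contains p.1 then
        p.2 + (pvSplit ((PySem.Dict.mk index2reads).getD p.1 "")).foldl
          (fun acc r => acc + (if PySem.Set.contains (PySem.Set.ofList dups) r then 1 else 0)) 0
      else p.2)
    = p.2 + pvLook dups index2reads p.1 := by
  have hcnt : ∀ s : String,
      (pvSplit s).foldl (fun acc r => acc + (if PySem.Set.contains (PySem.Set.ofList dups) r then 1 else 0)) 0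
        = pvCnt dups s := by
    intro s
    have : (fun (acc : Int) r => acc + (if PySem.Set.contains (PySem.Set.ofList dups) r then 1 else 0))
        = (fun acc r => acc + (if dups.contains r then 1 else 0)) := by
      funext acc r; rw [pv_set_contains]
    rw [this, pv_count_eq]; rfl
  cases hf : index2reads.find? (fun q => q.1 == p.1) with
  | none =>
    have hget : (PySem.Dict.mk index2reads).get? p.1 = none := by
      rw [pv_get?_mk_find, hf]; rfl
    have hcon : (PySem.Dict.mk index2reads).contains p.1 = false := by
      rw [PySem.Dict.contains_eq_isSome_get?, hget]; rfl
    simp [hcon, pvLook, hf]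
  | some q =>
    have hget : (PySem.Dict.mk index2reads).get? p.1 = some q.2 := by
      rw [pv_get?_mk_find, hf]; rfl
    have hcon : (PySem.Dict.mk index2reads).contains p.1 = true := by
      rw [PySem.Dict.contains_eq_isSome_get?, hget]; rfl
    rw [if_pos hcon, PySem.Dict.getD_of_get?_eq_some _ _ hget, hcnt, pvLook, hf]

theorem update_dups_spec : Claim_equal_update_dups := by
  intro dups i2d i2r _ hpre
  obtain ⟨h1, h2⟩ := hpre
  have hndD : (PySem.Dict.mk i2d).keys.Nodup := by simpa using h1
  have hR : ∀ p ∈ i2r, (PySem.Dict.mk i2r).getD p.1 "" = p.2 := by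
    intro p hp
    exact PySem.Dict.getD_of_get?_eq_some _ _
      (PySem.Dict.get?_of_mem_items _ (by simpa using hp) (by simpa using h2))
  have hA := pv_fold_items dups (PySem.Dict.mk i2r) i2r (PySem.Dict.mk i2d) hndD h2 hR
  have hB := PySem.Dict.items_foldl_insert_fresh (l := (PySem.Dict.mk i2d).items)
    (k := fun p => p.1)
    (v := fun p => (if (PySem.Dict.mk i2r).contains p.1 then
           p.2 + (pvSplit ((PySem.Dict.mk i2r).getD p.1 "")).foldl
             (fun acc r => acc + (if PySem.Set.contains (PySem.Set.ofList dups) r then 1 else 0)) 0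
         else p.2))
    (d := PySem.Dict.empty)
    (fun a _ => rfl) (by simpa using h1)
  show ((i2r.map Prod.fst).foldl (fun d i => pvInner dups i d (pvSplit ((PySem.Dict.mk i2r).getD i ""))) (PySem.Dict.mk i2d)).items
      = ((PySem.Dict.mk i2d).items.foldl (fun d p =>
          d.insert p.1 (if (PySem.Dict.mk i2r).contains p.1 then
             p.2 + (pvSplit ((PySem.Dict.mk i2r).getD p.1 "")).foldl
               (fun acc r => acc + (if PySem.Set.contains (PySem.Set.ofList dups) r then 1 else 0)) 0
           else p.2)) PySem.Dict.empty).items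
  rw [hA, hB]
  simp only [show (PySem.Dict.empty : PySem.Dict String Int).items = [] from rfl, List.nil_append]
  apply List.map_congr_left
  intro p _
  rw [pv_value_eq]
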